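-- pv_equiv track=rewrite | github.com/JoshKing85/new_home_repository | lab_6/golden_number.py | golden_number
-- ===== SOURCE A (Python) =====
-- def golden_number(n):
--
--     is_gold = False
--
--     # Nested loop to find summation of n
--     for a in range(n):
--         for b in range(n):
--
--             # Checks if argument meets all propositional statements.
--             if a + b == n and a*b % 1000 == 0:
--                 is_gold = True
--                 break
--
--
--     return is_gold
-- ===== SOURCE B (Python) =====
-- def golden_number(n):
--     # Single pass: b is determined as n - a; check a*(n-a) divisible by 1000.
--     return any(a * (n - a) % 1000 == 0 for a in range(1, n))
-- ===== Notes on version B (the rewrite author's own statement) =====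
-- stated objective: faster
-- what changed: Replaced the nested scan over all (a,b) pairs by a single loop where b = n - a is computed directly and a*(n-a) % 1000 is tested.
import Mathlib
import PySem

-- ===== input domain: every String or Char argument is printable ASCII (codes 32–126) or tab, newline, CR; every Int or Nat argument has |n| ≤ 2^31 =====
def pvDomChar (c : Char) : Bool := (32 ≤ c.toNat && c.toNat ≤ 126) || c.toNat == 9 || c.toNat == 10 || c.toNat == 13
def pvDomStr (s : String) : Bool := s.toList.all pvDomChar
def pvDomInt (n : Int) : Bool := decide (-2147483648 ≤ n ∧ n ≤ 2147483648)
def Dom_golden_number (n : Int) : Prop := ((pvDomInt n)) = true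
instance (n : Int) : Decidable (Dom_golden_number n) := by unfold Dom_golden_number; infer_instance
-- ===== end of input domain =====

-- B replaces A's nested O(n^2) scan over all (a,b) pairs by a single O(n) loop with b = n - a.

-- ===== PORT A =====
-- inner 'for b in range(n): if a+b==n and a*b%1000==0: is_gold=True; break'
def goldenInnerA (n a : Int) : List Int → Bool → Bool
  | [], g => g
  | b :: bs, g =>
      if a + b == n && PySem.Int.mod (a * b) 1000 == 0 then true
      else goldenInnerA n a bs g

def golden_number (n : Int) : Bool :=
  (PySem.List.pyRange 0 n 1).foldl
    (fun g a => goldenInnerA n a (PySem.List.pyRange 0 n 1) g) false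

-- ===== PORT B =====
def golden_number_alt (n : Int) : Bool :=
  (PySem.List.pyRange 1 n 1).any (fun a => PySem.Int.mod (a * (n - a)) 1000 == 0)

-- ===== PRECONDITION & SPEC =====
def Spec_golden_number (n : Int) (out : Bool) : Prop := out = golden_number_alt n
instance (n : Int) (out : Bool) : Decidable (Spec_golden_number n out) := by unfold Spec_golden_number; infer_instance

-- ===== CLAIM (what is proved, stated in full; the proofs are below) =====
def Claim_equal_golden_number : Prop := ∀ (n : Int), Dom_golden_number n → Spec_golden_number n (golden_number n)

-- ===== LEMMAS AND PROOFS =====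

-- the break-loop is 'g || any'
theorem goldenInnerA_eq_any (n a : Int) (l : List Int) (g : Bool) :
    goldenInnerA n a l g
      = (g || l.any (fun b => a + b == n && PySem.Int.mod (a * b) 1000 == 0)) := by
  induction l generalizing g with
  | nil => simp [goldenInnerA]
  | cons b bs ih =>
      unfold goldenInnerA
      rw [List.any_cons]
      split
      · rename_i h; rw [h]; simp
      · rename_i h
        rw [Bool.not_eq_true] at h
        rw [ih, h]
        simp

theorem foldl_or_any {α : Type} (p : α → Bool) (l : List α) (g : Bool) :
    l.foldl (fun g a => g || p a) g = (g || l.any p) := by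
  induction l generalizing g with
  | nil => simp
  | cons x xs ih => simp [List.foldl_cons, ih, Bool.or_assoc]

theorem golden_number_eq_any (n : Int) :
    golden_number n
      = (PySem.List.pyRange 0 n 1).any (fun a =>
          (PySem.List.pyRange 0 n 1).any (fun b =>
            a + b == n && PySem.Int.mod (a * b) 1000 == 0)) := by
  unfold golden_number
  have : ∀ (l : List Int) (g : Bool),
      l.foldl (fun g a => goldenInnerA n a (PySem.List.pyRange 0 n 1) g) g
        = l.foldl (fun g a => g || (PySem.List.pyRange 0 n 1).any
            (fun b => a + b == n && PySem.Int.mod (a * b) 1000 == 0)) g := by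
    intro l
    induction l with
    | nil => intro g; rfl
    | cons x xs ih => intro g; rw [List.foldl_cons, List.foldl_cons, goldenInnerA_eq_any, ih]
  rw [this, foldl_or_any]
  simp

-- ===== VERDICT (by name: the statement is the Claim_ definition above) =====
theorem golden_number_spec : Claim_equal_golden_number := by
  intro n _
  unfold Spec_golden_number golden_number_alt
  rw [golden_number_eq_any]
  apply Bool.eq_iff_iff.mpr
  simp only [List.any_eq_true, PySem.List.mem_pyRange_one, beq_iff_eq, Bool.and_eq_true]
  constructor
  · rintro ⟨a, ⟨ha0, han⟩, b, ⟨hb0, hbn⟩, hab, hm⟩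
    refine ⟨a, ⟨by omega, han⟩, ?_⟩
    have hb : b = n - a := by omega
    rw [hb] at hm
    exact hm
  · rintro ⟨a, ⟨ha1, han⟩, hm⟩
    exact ⟨a, ⟨by omega, han⟩, n - a, ⟨by omega, by omega⟩, by omega, hm⟩
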